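-- pv_equiv track=rewrite | github.com/abrleva8/General_Of_Python_Advanced | general_construction/step 2.2.10.py | some_func
-- ===== SOURCE A (Python) =====
-- def some_func(string):
--     if string.count('n') < 2:
--         return False
--     arr = list('anton')
--     index = 0
--     for ch in arr:
--         if string.find(ch, index) > -1:
--             index = string.find(ch, index)
--         else:
--             return False
--     return True
-- ===== SOURCE B (Python) =====
-- def some_func(string):
--     pattern = 'anton'
--     i = 0
--     for ch in string:
--         if i < len(pattern) and ch == pattern[i]:
--             i += 1
--     return i == len(pattern)
-- ===== Notes on version B (the rewrite author's own statement) =====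
-- stated objective: idiomatic
-- what changed: A loops over the pattern 'anton' and repeatedly scans the string with str.find (plus a redundant n-count guard); B is a single forward pass over the string advancing an integer pointer into the fixed pattern (plain greedy subsequence test).
import Mathlib
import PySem

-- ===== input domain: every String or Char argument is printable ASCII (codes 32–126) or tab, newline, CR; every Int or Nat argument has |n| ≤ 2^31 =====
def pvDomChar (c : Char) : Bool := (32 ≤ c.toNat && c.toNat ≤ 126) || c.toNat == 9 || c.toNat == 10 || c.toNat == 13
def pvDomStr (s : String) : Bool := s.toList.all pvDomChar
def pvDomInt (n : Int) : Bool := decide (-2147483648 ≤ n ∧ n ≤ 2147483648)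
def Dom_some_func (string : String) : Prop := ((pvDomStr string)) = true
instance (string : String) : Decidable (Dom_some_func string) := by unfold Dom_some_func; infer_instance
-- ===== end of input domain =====

-- B replaces A's pattern-driven str.find scanning (with a redundant n-count guard) by a
-- single forward pass over the string advancing a pointer into the fixed pattern 'anton'
-- (idiomatic greedy subsequence test); proved to return the same Bool on all inputs.


-- ===== PORT A =====
-- the 'for ch in arr' loop: remaining pattern chars and the current 'index'
def someFuncGo (string : String) : List Char → Int → Bool
  | [], _ => true
  | ch :: rest, index =>
    if PySem.Str.findFrom string (String.ofList [ch]) index none > -1 then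
      someFuncGo string rest (PySem.Str.findFrom string (String.ofList [ch]) index none)
    else false

def some_func (string : String) : Bool :=
  if PySem.Str.count string "n" < 2 then false
  else someFuncGo string "anton".toList 0

-- ===== PORT B =====
-- Source B's loop body: advance the pattern pointer i on a match
def pvStep (i : Nat) (ch : Char) : Nat :=
  if i < "anton".toList.length ∧ ch = "anton".toList.getD i ' ' then i + 1 else i

def some_func_alt (string : String) : Bool :=
  string.toList.foldl pvStep 0 == "anton".toList.length

-- ===== PRECONDITION & SPEC =====
def Spec_some_func (string : String) (out : Bool) : Prop := out = some_func_alt string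
instance (string : String) (out : Bool) : Decidable (Spec_some_func string out) := by unfold Spec_some_func; infer_instance

-- ===== CLAIM (what is proved, stated in full; the proofs are below) =====
def Claim_equal_some_func : Prop := ∀ (string : String), Dom_some_func string → Spec_some_func string (some_func string)

-- ===== LEMMAS AND PROOFS =====

theorem pat_eq : "anton".toList = ['a', 'n', 't', 'o', 'n'] := by decide

-- ----- generic sublist facts -----

theorem sublist_of_head_ne {c a : Char} {l m : List Char} (h : (c :: l).Sublist (a :: m))
    (hne : c ≠ a) : (c :: l).Sublist m := by
  rcases List.sublist_cons_iff.mp h with h' | ⟨r, hr, hrs⟩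
  · exact h'
  · cases hr; exact absurd rfl hne

-- greedy step: if c::rest is a subsequence of m.drop k and j is the FIRST index ≥ k with m[j] = c,
-- then rest is a subsequence of m.drop (j+1)
theorem greedy_step (m : List Char) (c : Char) (rest : List Char) :
    ∀ (d k j : Nat), j - k = d → k ≤ j →
    (c :: rest).Sublist (m.drop k) →
    (∀ i, k ≤ i → i < j → m[i]? ≠ some c) →
    m[j]? = some c →
    rest.Sublist (m.drop (j + 1)) := by
  intro d
  induction d with
  | zero =>
    intro k j hd hkj hsub _ hj
    have hkj' : k = j := by omega
    subst hkj'
    have hdrop : m.drop k = c :: m.drop (k + 1) := by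
      have hk : k < m.length := by
        by_contra hk
        simp [List.getElem?_eq_none (by omega : m.length ≤ k)] at hj
      rw [List.drop_eq_getElem_cons hk]
      have : m[k] = c := by
        have := List.getElem?_eq_getElem hk
        rw [this] at hj; exact Option.some.injEq _ _ ▸ (by simpa using hj)
      rw [this]
    rw [hdrop] at hsub
    rcases List.sublist_cons_iff.mp hsub with h' | ⟨r, hr, hrs⟩
    · exact (List.sublist_cons_self c rest).trans h'
    · cases hr; exact hrs
  | succ d ih =>
    intro k j hd hkj hsub hmin hj
    have hkj' : k < j := by omega
    have hk : k < m.length := by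
      have hjlt : j < m.length := by
        by_contra hjl
        simp [List.getElem?_eq_none (by omega : m.length ≤ j)] at hj
      omega
    have hdropk : m.drop k = m[k] :: m.drop (k + 1) := List.drop_eq_getElem_cons hk
    rw [hdropk] at hsub
    have hne : c ≠ m[k] := by
      intro hEq
      exact hmin k le_rfl hkj' (by rw [List.getElem?_eq_getElem hk, hEq])
    have hsub' := sublist_of_head_ne hsub hne
    exact ih (k + 1) j (by omega) (by omega) hsub'
      (fun i h1 h2 => hmin i (by omega) h2) hj

-- ----- characterisation of A's loop -----

-- A's find-loop succeeds iff the remaining pattern (whose adjacent chars differ)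
-- is a subsequence of the string from position k on
theorem someFuncGo_iff (s : String) (p : List Char) :
    List.IsChain (· ≠ ·) p → ∀ (k : Nat), k ≤ s.toList.length →
    (someFuncGo s p (k : Int) = true ↔ p.Sublist (s.toList.drop k)) := by
  induction p with
  | nil =>
    intro _ k hk
    simp [someFuncGo, List.nil_sublist]
  | cons c rest ih =>
    intro hchain k hk
    have hchain' : List.IsChain (· ≠ ·) rest := hchain.tail
    have hmk : (String.ofList [c]).toList = [c] := by simp
    constructor
    · intro h
      unfold someFuncGo at h
      split at h
      · rename_i hpos
        rw [PySem.Str.findFrom_eq, hmk] at h hpos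
        set f := PySem.Chars.findFrom s.toList [c] (k : Int) none with hf
        have hne : f ≠ -1 := by omega
        obtain ⟨hkf, hpre, hminf⟩ := PySem.Chars.findFrom_natCast_spec s.toList [c] k hk hne
        have hfge : 0 ≤ f := by omega
        have hfnat : f = ((f.toNat : Nat) : Int) := by omega
        obtain ⟨t, ht, -⟩ := List.cons_prefix_iff.mp hpre
        have hflen : f.toNat < s.toList.length := by
          by_contra hge
          have : s.toList.drop f.toNat = [] := List.drop_eq_nil_of_le (by omega)
          rw [this] at ht; simp at ht
        have hrest : rest.Sublist (s.toList.drop f.toNat) := by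
          have := (ih hchain' f.toNat (by omega)).mp (by rw [← hfnat]; exact h)
          exact this
        have hcf : s.toList[f.toNat] = c := by
          have h1 : s.toList[f.toNat]? = some c := by rw [← List.head?_drop, ht]; rfl
          rw [List.getElem?_eq_getElem hflen] at h1
          exact Option.some.inj h1
        have hrest' : rest.Sublist (s.toList.drop (f.toNat + 1)) := by
          have hdropf : s.toList.drop f.toNat = c :: s.toList.drop (f.toNat + 1) := by
            rw [List.drop_eq_getElem_cons hflen, hcf]
          rw [hdropf] at hrest
          cases rest with
          | nil => exact List.nil_sublist _
          | cons r rs =>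
            have hner : r ≠ c := by
              have := List.isChain_cons_cons.mp hchain
              exact (Ne.symm this.1)
            exact sublist_of_head_ne hrest hner
        have : (c :: rest).Sublist (s.toList.drop f.toNat) := by
          rw [List.drop_eq_getElem_cons hflen, hcf]
          exact List.cons_sublist_cons.mpr hrest'
        have hsubdrop : (s.toList.drop f.toNat).Sublist (s.toList.drop k) := by
          have : s.toList.drop f.toNat = (s.toList.drop k).drop (f.toNat - k) := by
            rw [List.drop_drop]; congr 1; omega
          rw [this]; exact List.drop_sublist _ _
        exact this.trans hsubdrop
      · exact absurd h (by simp)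
    · intro hsub
      unfold someFuncGo
      rw [PySem.Str.findFrom_eq, hmk]
      set f := PySem.Chars.findFrom s.toList [c] (k : Int) none with hf
      have hinf : [c] <:+: s.toList.drop k := by
        have hc : c ∈ s.toList.drop k := hsub.subset (List.mem_cons_self ..)
        obtain ⟨l1, l2, hsplit⟩ := List.append_of_mem hc
        exact ⟨l1, l2, by simpa using hsplit.symm⟩
      have hne : f ≠ -1 := by
        rw [hf]
        intro hEq
        exact (PySem.Chars.findFrom_natCast_eq_neg_one_iff s.toList [c] k hk).mp hEq hinf
      obtain ⟨hkf, hpre, hminf⟩ := PySem.Chars.findFrom_natCast_spec s.toList [c] k hk hne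
      have hfge : 0 ≤ f := by omega
      rw [if_pos (by omega)]
      obtain ⟨t, ht, -⟩ := List.cons_prefix_iff.mp hpre
      have hflen : f.toNat < s.toList.length := by
        by_contra hge
        have : s.toList.drop f.toNat = [] := List.drop_eq_nil_of_le (by omega)
        rw [this] at ht; simp at ht
      have hcf : s.toList[f.toNat]? = some c := by
        rw [← List.head?_drop, ht]; rfl
      have hmin' : ∀ i, k ≤ i → i < f.toNat → s.toList[i]? ≠ some c := by
        intro i h1 h2 hEq
        apply hminf i h1 h2
        have hi : i < s.toList.length := by omega
        refine List.cons_prefix_iff.mpr ⟨s.toList.drop (i + 1), ?_, List.nil_prefix⟩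
        rw [List.drop_eq_getElem_cons hi]
        have : s.toList[i] = c := by
          rw [List.getElem?_eq_getElem hi] at hEq; simpa using hEq
        rw [this]
      have hrest : rest.Sublist (s.toList.drop (f.toNat + 1)) :=
        greedy_step s.toList c rest (f.toNat - k) k f.toNat rfl (by omega) hsub hmin' hcf
      have hrestf : rest.Sublist (s.toList.drop f.toNat) :=
        hrest.trans (by
          have : s.toList.drop (f.toNat + 1) = (s.toList.drop f.toNat).drop 1 := by
            rw [List.drop_drop]
          rw [this]; exact List.drop_sublist _ _)
      have hfnat : f = ((f.toNat : Nat) : Int) := by omega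
      rw [hfnat]
      exact (ih hchain' f.toNat (by omega)).mpr hrestf

-- ----- characterisation of B's fold -----

theorem foldl_pvStep_iff (l : List Char) :
    ∀ (i : Nat), i ≤ 5 →
    (l.foldl pvStep i = 5 ↔ (['a', 'n', 't', 'o', 'n'].drop i).Sublist l) := by
  induction l with
  | nil =>
    intro i hi
    simp only [List.foldl_nil, List.sublist_nil]
    constructor
    · intro h; subst h; rfl
    · intro h
      interval_cases i <;> simp_all
  | cons c cs ih =>
    intro i hi
    by_cases h5 : i = 5
    · subst h5
      simp only [List.foldl_cons]
      have hstep : pvStep 5 c = 5 := by simp [pvStep, pat_eq]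
      rw [hstep]
      rw [ih 5 le_rfl]
      simp
    · have hlt : i < 5 := by omega
      simp only [List.foldl_cons]
      have hdrop : (['a', 'n', 't', 'o', 'n'] : List Char).drop i =
          ['a', 'n', 't', 'o', 'n'].getD i ' ' :: ['a', 'n', 't', 'o', 'n'].drop (i + 1) := by
        interval_cases i <;> rfl
      by_cases hc : c = ['a', 'n', 't', 'o', 'n'].getD i ' '
      · have hstep : pvStep i c = i + 1 := by
          simp only [pvStep, pat_eq]
          exact if_pos ⟨by simpa using hlt, hc⟩
        rw [hstep, ih (i + 1) (by omega), hdrop, ← hc]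
        exact (List.cons_sublist_cons).symm
      · have hstep : pvStep i c = i := by
          simp only [pvStep, pat_eq]
          exact if_neg (fun h => hc h.2)
        rw [hstep, ih i hi, hdrop]
        constructor
        · intro h
          exact List.sublist_cons_of_sublist c h
        · intro h
          exact sublist_of_head_ne h (fun hEq => hc hEq.symm)
    
-- ----- count bridge: Chars.count with a single-char needle is List.count -----

theorem count_go_singleton (c : Char) :
    ∀ (fuel : Nat) (l : List Char) (acc : Nat), l.length ≤ fuel →
    PySem.Chars.count.go [c] fuel l acc = acc + l.count c := by
  intro fuel
  induction fuel with
  | zero =>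
    intro l acc hl
    have : l = [] := List.eq_nil_of_length_eq_zero (by omega)
    subst this
    simp [PySem.Chars.count.go]
  | succ fuel ih =>
    intro l acc hl
    cases l with
    | nil => simp [PySem.Chars.count.go]
    | cons h t =>
      rw [PySem.Chars.count.go]
      by_cases hEq : h = c
      · subst hEq
        rw [if_pos (by simp [List.isPrefixOf])]
        have hdr : List.drop [h].length (h :: t) = t := rfl
        rw [hdr]
        simp only [List.length_cons] at hl
        rw [ih t (acc + 1) (by omega)]
        simp
        omega
      · have hcond : ¬(([c].isPrefixOf (h :: t)) = true) := by
          simp [List.isPrefixOf]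
          exact fun h' => hEq h'.symm
        rw [if_neg hcond]
        simp only [List.length_cons] at hl
        rw [ih t acc (by omega)]
        simp [hEq]
    
theorem count_singleton (l : List Char) (c : Char) :
    PySem.Chars.count l [c] = l.count c := by
  unfold PySem.Chars.count
  rw [if_neg (by simp)]
  simpa using count_go_singleton c l.length l 0 le_rfl

-- ===== VERDICT (by name: the statement is the Claim_ definition above) =====
theorem some_func_spec : Claim_equal_some_func := by
  intro s _
  unfold Spec_some_func some_func some_func_alt
  have hchain : List.IsChain (· ≠ ·) ("anton".toList) := by rw [pat_eq]; decide
  have hA := someFuncGo_iff s "anton".toList hchain 0 (Nat.zero_le _)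
  have hB := foldl_pvStep_iff s.toList 0 (by omega)
  rw [List.drop_zero] at hA hB
  rw [pat_eq] at hA
  have hlen : "anton".toList.length = 5 := rfl
  have hcast : ((0 : Nat) : Int) = 0 := rfl
  rw [hcast] at hA
  rw [hlen]
  by_cases hcnt : PySem.Str.count s "n" < 2
  · rw [if_pos hcnt]
    symm
    rw [beq_eq_false_iff_ne]
    intro h5
    have hsub := hB.mp h5
    have hcount : (2 : Nat) ≤ s.toList.count 'n' := by
      have := hsub.count_le 'n'
      simpa using this
    rw [PySem.Str.count_eq] at hcnt
    have : PySem.Chars.count s.toList "n".toList = s.toList.count 'n' := by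
      have : "n".toList = ['n'] := rfl
      rw [this, count_singleton]
    omega
  · rw [if_neg hcnt]
    rw [Bool.eq_iff_iff, beq_iff_eq, pat_eq, hA, hB]
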